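-- pv_equiv track=rewrite | github.com/mohammadfaiizan/ProjectI | DSA/Problem/Graph/02_Depth_First_Search_DFS/1466_Reorder_Routes_to_Make_All_Paths_Lead_to_the_City_Zero.py | minReorder_approach4_iterative_dfs
-- ===== SOURCE A (Python) =====
-- from typing import List
-- from collections import defaultdict, deque
--
-- def minReorder_approach4_iterative_dfs(n: int, connections: List[List[int]]) -> int:
--     """
--     Approach 4: Iterative DFS to avoid recursion
--
--     Use explicit stack for DFS traversal.
--
--     Time: O(N)
--     Space: O(N)
--     """
--     # Build graph with direction info
--     graph = defaultdict(list)
--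
--     for a, b in connections:
--         graph[a].append((b, True))   # Forward edge
--         graph[b].append((a, False))  # Backward edge
--
--     visited = set()
--     stack = [0]
--     reversals = 0
--
--     while stack:
--         city = stack.pop()
--
--         if city in visited:
--             continue
--
--         visited.add(city)
--
--         for neighbor, is_forward in graph[city]:
--             if neighbor not in visited:
--                 if is_forward:
--                     reversals += 1
--                 stack.append(neighbor)
--
--     return reversals
-- ===== SOURCE B (Python) =====
-- from typing import List
-- from collections import defaultdict
--
-- def minReorder_approach4_iterative_dfs(n: int, connections: List[List[int]]) -> int:
--     """Two-phase rewrite: the DFS records only each city's discovery index;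
--     the reversal count is a separate pass comparing discovery positions."""
--     adj = defaultdict(list)
--     for a, b in connections:
--         adj[a].append(b)
--         adj[b].append(a)
--
--     pos = {}
--     k = 0
--     stack = [0]
--     while stack:
--         city = stack.pop()
--         if city in pos:
--             continue
--         pos[city] = k
--         k += 1
--         for nb in adj[city]:
--             if nb not in pos:
--                 stack.append(nb)
--
--     total = 0
--     for a, b in connections:
--         if a in pos and (b not in pos or pos[a] < pos[b]):
--             total += 1
--     return total
-- ===== Notes on version B (the rewrite author's own statement) =====
-- stated objective: alternative
-- what changed: B drops the direction flags from the adjacency lists: its stack DFS records only each city's discovery index, and the reversal count is computed afterwards in a separate pass over connections that counts edges whose tail was discovered and whose head was undiscovered or discovered later.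
import Mathlib
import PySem

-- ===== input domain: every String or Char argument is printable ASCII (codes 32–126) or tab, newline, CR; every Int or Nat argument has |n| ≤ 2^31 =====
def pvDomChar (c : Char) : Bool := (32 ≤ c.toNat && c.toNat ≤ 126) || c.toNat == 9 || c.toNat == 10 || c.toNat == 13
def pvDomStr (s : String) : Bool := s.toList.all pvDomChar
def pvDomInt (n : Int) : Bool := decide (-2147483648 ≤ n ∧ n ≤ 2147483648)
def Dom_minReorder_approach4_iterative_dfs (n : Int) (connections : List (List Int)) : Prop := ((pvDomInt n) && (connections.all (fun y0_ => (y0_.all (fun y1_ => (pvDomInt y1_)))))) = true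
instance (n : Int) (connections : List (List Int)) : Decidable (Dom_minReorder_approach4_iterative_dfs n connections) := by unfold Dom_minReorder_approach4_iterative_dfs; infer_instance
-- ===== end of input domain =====

-- B moves the reversal counting out of the traversal: the stack DFS records only each
-- city's discovery index, and a separate pass over `connections` counts the edges whose
-- tail was discovered before (or instead of) their head — same result, different
-- decomposition (objective: alternative; not claimed faster).

-- ===== PORT A =====
-- graph[a].append((b, True)); graph[b].append((a, False))  (defaultdict(list); rows that
-- are not pairs make Python's unpacking raise ValueError — Pre_ excludes them, the port
-- skips them)
def pvRowA (d : PySem.Dict Int (List (Int × Bool))) (row : List Int) :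
    PySem.Dict Int (List (Int × Bool)) :=
  match row with
  | [a, b] =>
      let d1 := d.insert a (d.getD a [] ++ [(b, true)])
      d1.insert b (d1.getD b [] ++ [(a, false)])
  | _ => d

-- the while-loop; the stack is kept top-first (Python appends/pops at the end), and the
-- neighbor scan folds (reversals, stack) together exactly as the Python body does.
-- fuel: each iteration pops once; pops ≤ 1 + total pushes ≤ 1 + 2·len(connections),
-- so fuel = 2·len(connections)+2 never runs out on the Python side.
def pvLoopA (g : PySem.Dict Int (List (Int × Bool))) :
    Nat → List Int → PySem.Set Int → Int → Int
  | 0, _, _, rev => rev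
  | _ + 1, [], _, rev => rev
  | fuel + 1, city :: rest, visited, rev =>
      if visited.contains city then pvLoopA g fuel rest visited rev
      else
        let visited' := visited.add city
        let st := (g.getD city []).foldl
          (fun (p : Int × List Int) e =>
            if visited'.contains e.1 then p
            else ((if e.2 then p.1 + 1 else p.1), e.1 :: p.2)) (rev, rest)
        pvLoopA g fuel st.2 visited' st.1

def minReorder_approach4_iterative_dfs (n : Int) (connections : List (List Int)) : Int :=
  pvLoopA (connections.foldl pvRowA PySem.Dict.empty)
    (2 * connections.length + 2) [0] PySem.Set.empty 0

-- ===== PORT B =====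
-- adj[a].append(b); adj[b].append(a)  (no direction flags)
def pvRowB (d : PySem.Dict Int (List Int)) (row : List Int) : PySem.Dict Int (List Int) :=
  match row with
  | [a, b] =>
      let d1 := d.insert a (d.getD a [] ++ [b])
      d1.insert b (d1.getD b [] ++ [a])
  | _ => d

-- B's traversal: same stack discipline, but it only records pos[city] = discovery index
def pvLoopB (g : PySem.Dict Int (List Int)) :
    Nat → List Int → PySem.Dict Int Int → Int → PySem.Dict Int Int
  | 0, _, pos, _ => pos
  | _ + 1, [], pos, _ => pos
  | fuel + 1, city :: rest, pos, k =>
      if (pos.get? city).isSome then pvLoopB g fuel rest pos k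
      else
        let pos' := pos.insert city k
        let st := (g.getD city []).foldl
          (fun (s : List Int) nb => if (pos'.get? nb).isSome then s else nb :: s) rest
        pvLoopB g fuel st pos' (k + 1)

-- second pass: count edges [a,b] with a discovered and b undiscovered or discovered later
def pvCountB (cs : List (List Int)) (pos : PySem.Dict Int Int) : Int :=
  cs.foldl (fun t row =>
    match row with
    | [a, b] =>
        match pos.get? a, pos.get? b with
        | some _, none => t + 1
        | some pa, some pb => if pa < pb then t + 1 else t
        | none, _ => t
    | _ => t) 0

def minReorder_approach4_iterative_dfs_alt (n : Int) (connections : List (List Int)) : Int :=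
  pvCountB connections
    (pvLoopB (connections.foldl pvRowB PySem.Dict.empty)
      (2 * connections.length + 2) [0] PySem.Dict.empty 0)

-- ===== PRECONDITION & SPEC =====
-- Pre_ excludes exactly the rows on which Python's `for a, b in connections` unpacking
-- raises ValueError (rows whose length is not 2); A returns on every other input.
def Pre_minReorder_approach4_iterative_dfs (n : Int) (connections : List (List Int)) : Prop :=
  ∀ row ∈ connections, row.length = 2
instance (n : Int) (connections : List (List Int)) : Decidable (Pre_minReorder_approach4_iterative_dfs n connections) := by unfold Pre_minReorder_approach4_iterative_dfs; infer_instance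

def pvWitness_minReorder_approach4_iterative_dfs : Int × List (List Int) :=
  (4, [[0, 1], [1, 3], [2, 3]])

def Spec_minReorder_approach4_iterative_dfs (n : Int) (connections : List (List Int)) (out : Int) : Prop := out = minReorder_approach4_iterative_dfs_alt n connections
instance (n : Int) (connections : List (List Int)) (out : Int) : Decidable (Spec_minReorder_approach4_iterative_dfs n connections out) := by unfold Spec_minReorder_approach4_iterative_dfs; infer_instance

-- ===== CLAIM (what is proved, stated in full; the proofs are below) =====
def Claim_equal_minReorder_approach4_iterative_dfs : Prop := ∀ (n : Int) (connections : List (List Int)), Dom_minReorder_approach4_iterative_dfs n connections → Pre_minReorder_approach4_iterative_dfs n connections → Spec_minReorder_approach4_iterative_dfs n connections (minReorder_approach4_iterative_dfs n connections)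

-- ===== LEMMAS AND PROOFS =====

-- the per-row chunk of A's adjacency list for city c
def pvChunk (c : Int) (row : List Int) : List (Int × Bool) :=
  match row with
  | [a, b] => (if a = c then [(b, true)] else []) ++ (if b = c then [(a, false)] else [])
  | _ => []

def pvAdjA (cs : List (List Int)) (c : Int) : List (Int × Bool) :=
  cs.flatMap (pvChunk c)

-- the number of forward entries of l whose target is not "in" (m) — A's rev increment
def pvCnt (m : Int → Bool) (l : List (Int × Bool)) : Int :=
  ((l.filter (fun e => e.2 && !(m e.1))).length : Int)

-- contribution of one row to B's counting pass
def pvContrib (pos : PySem.Dict Int Int) (row : List Int) : Int :=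
  match row with
  | [a, b] =>
      match pos.get? a, pos.get? b with
      | some _, none => 1
      | some pa, some pb => if pa < pb then 1 else 0
      | none, _ => 0
  | _ => 0

lemma pvRowA_getD (d : PySem.Dict Int (List (Int × Bool))) (row : List Int) (c : Int) :
    (pvRowA d row).getD c [] = d.getD c [] ++ pvChunk c row := by
  rcases row with _ | ⟨a, _ | ⟨b, _ | _⟩⟩
  · simp [pvRowA, pvChunk]
  · simp [pvRowA, pvChunk]
  · show ((d.insert a (d.getD a [] ++ [(b, true)])).insert b
        ((d.insert a (d.getD a [] ++ [(b, true)])).getD b [] ++ [(a, false)])).getD c []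
        = d.getD c [] ++ pvChunk c [a, b]
    simp only [PySem.Dict.getD_insert, pvChunk]
    split_ifs <;> subst_vars <;> simp_all
  · simp [pvRowA, pvChunk]

lemma pvBuildA_getD (cs : List (List Int)) (d : PySem.Dict Int (List (Int × Bool))) (c : Int) :
    (cs.foldl pvRowA d).getD c [] = d.getD c [] ++ pvAdjA cs c := by
  induction cs generalizing d with
  | nil => simp [pvAdjA]
  | cons row cs ih =>
      simp only [List.foldl_cons, ih, pvRowA_getD, pvAdjA, List.flatMap_cons,
        List.append_assoc]

lemma pvRowB_getD (d : PySem.Dict Int (List Int)) (row : List Int) (c : Int) :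
    (pvRowB d row).getD c [] = d.getD c [] ++ (pvChunk c row).map Prod.fst := by
  rcases row with _ | ⟨a, _ | ⟨b, _ | _⟩⟩
  · simp [pvRowB, pvChunk]
  · simp [pvRowB, pvChunk]
  · show ((d.insert a (d.getD a [] ++ [b])).insert b
        ((d.insert a (d.getD a [] ++ [b])).getD b [] ++ [a])).getD c []
        = d.getD c [] ++ (pvChunk c [a, b]).map Prod.fst
    simp only [PySem.Dict.getD_insert, pvChunk]
    split_ifs <;> subst_vars <;> simp_all
  · simp [pvRowB, pvChunk]

lemma pvBuildB_getD (cs : List (List Int)) (d : PySem.Dict Int (List Int)) (c : Int) :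
    (cs.foldl pvRowB d).getD c [] = d.getD c [] ++ (pvAdjA cs c).map Prod.fst := by
  induction cs generalizing d with
  | nil => simp [pvAdjA]
  | cons row cs ih =>
      simp only [List.foldl_cons, ih, pvRowB_getD, pvAdjA, List.flatMap_cons,
        List.map_append, List.append_assoc]

lemma pvCnt_congr (m m' : Int → Bool) (h : ∀ x, m x = m' x) (l : List (Int × Bool)) :
    pvCnt m l = pvCnt m' l := by
  unfold pvCnt
  congr 2
  exact List.filter_congr (fun e _ => by rw [h e.1])

lemma pvCnt_append (m : Int → Bool) (l1 l2 : List (Int × Bool)) :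
    pvCnt m (l1 ++ l2) = pvCnt m l1 + pvCnt m l2 := by
  simp [pvCnt, List.filter_append]

lemma pvCnt_flatMap (m : Int → Bool) (c : Int) (cs : List (List Int)) :
    pvCnt m (pvAdjA cs c) = (cs.map (fun r => pvCnt m (pvChunk c r))).sum := by
  induction cs with
  | nil => simp [pvAdjA, pvCnt]
  | cons row cs ih =>
      rw [show pvAdjA (row :: cs) c = pvChunk c row ++ pvAdjA cs c from rfl,
        pvCnt_append, ih, List.map_cons, List.sum_cons]

-- A's inner neighbor scan, against B's: same pushed stack, rev grows by pvCnt
lemma pvScan_eq (V : PySem.Set Int) (P : PySem.Dict Int Int)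
    (hm : ∀ x, V.contains x = (P.get? x).isSome) :
    ∀ (l : List (Int × Bool)) (rev : Int) (rest : List Int),
    l.foldl (fun (p : Int × List Int) e =>
        if V.contains e.1 then p
        else ((if e.2 then p.1 + 1 else p.1), e.1 :: p.2)) (rev, rest)
      = (rev + pvCnt V.contains l,
         (l.map Prod.fst).foldl
           (fun (s : List Int) nb => if (P.get? nb).isSome then s else nb :: s) rest) := by
  intro l
  induction l with
  | nil => intro rev rest; simp [pvCnt]
  | cons e l ih =>
      intro rev rest
      simp only [List.foldl_cons, List.map_cons]
      by_cases hv : V.contains e.1 = true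
      · have hmem : e.1 ∈ V := (PySem.Set.contains_iff V e.1).mp hv
        have hP : (P.get? e.1).isSome = true := by rw [← hm e.1]; exact hv
        rw [if_pos hv, if_pos hP, ih]
        have hcnt : pvCnt V.contains (e :: l) = pvCnt V.contains l := by
          simp [pvCnt, List.filter_cons, hmem]
        rw [hcnt]
      · have hv' : V.contains e.1 = false := by simpa using hv
        have hmem : e.1 ∉ V := fun h => by
          rw [(PySem.Set.contains_iff V e.1).mpr h] at hv'; cases hv'
        have hP : ¬ (P.get? e.1).isSome = true := by rw [← hm e.1]; exact hv
        rw [if_neg hv, if_neg hP, ih]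
        rcases e with ⟨nb, fwd⟩
        cases fwd <;> simp [pvCnt, List.filter_cons, hmem] <;> push_cast <;> omega

lemma pvCountB_eq_sum (cs : List (List Int)) (pos : PySem.Dict Int Int) :
    pvCountB cs pos = (cs.map (pvContrib pos)).sum := by
  suffices h : ∀ (init : Int), cs.foldl (fun t row =>
      match row with
      | [a, b] =>
          match pos.get? a, pos.get? b with
          | some _, none => t + 1
          | some pa, some pb => if pa < pb then t + 1 else t
          | none, _ => t
      | _ => t) init = init + (cs.map (pvContrib pos)).sum by
    simpa using h 0
  induction cs with
  | nil => intro init; simp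
  | cons row cs ih =>
      intro init
      simp only [List.foldl_cons, List.map_cons, List.sum_cons, ih]
      have : (match row with
        | [a, b] =>
            match pos.get? a, pos.get? b with
            | some _, none => init + 1
            | some pa, some pb => if pa < pb then init + 1 else init
            | none, _ => init
        | _ => init) = init + pvContrib pos row := by
        rcases row with _ | ⟨a, _ | ⟨b, _ | _⟩⟩ <;> simp only [pvContrib] <;> try ring
        rcases ha : pos.get? a with _ | pa <;> rcases hb : pos.get? b with _ | pb <;>
          simp [ha, hb] <;> (try split_ifs) <;> omega
      rw [this]; ring

-- key step: inserting the newly visited city raises every row's contribution by exactly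
-- the forward-edge count A adds while scanning that city's adjacency chunk
lemma pvContrib_insert (pos : PySem.Dict Int Int) (k city : Int)
    (hc : pos.get? city = none) (hb : ∀ x i, pos.get? x = some i → i < k)
    (row : List Int) :
    pvContrib (pos.insert city k) row
      = pvContrib pos row
        + pvCnt (fun x => ((pos.insert city k).get? x).isSome) (pvChunk city row) := by
  rcases row with _ | ⟨a, _ | ⟨b, _ | _⟩⟩ <;>
    simp only [pvContrib, pvChunk, pvCnt] <;> try simp
  by_cases hac : a = city
  · subst hac
    by_cases hbc : b = a
    · subst hbc
      simp [PySem.Dict.get?_insert_self, hc, pvCnt]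
    · rw [PySem.Dict.get?_insert_self]
      rw [PySem.Dict.get?_insert_of_ne _ _ hbc]
      rcases hbv : pos.get? b with _ | pb
      · simp [hc, hbv, hbc, PySem.Dict.get?_insert_of_ne _ _ hbc,
          PySem.Dict.get?_insert_self]
      · have : pb < k := hb b pb hbv
        simp [hc, hbv, hbc, PySem.Dict.get?_insert_of_ne _ _ hbc, this,
          not_lt.mpr (le_of_lt this)]
  · rw [PySem.Dict.get?_insert_of_ne _ _ hac]
    by_cases hbc : b = city
    · subst hbc
      rcases hav : pos.get? a with _ | pa
      · simp [hav, hac, hc]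
      · have : pa < k := hb a pa hav
        simp [hav, hac, hc, PySem.Dict.get?_insert_self, this]
    · rw [PySem.Dict.get?_insert_of_ne _ _ hbc]
      simp [hac, hbc]

-- the simulation: A's loop returns B's counting pass applied to B's final pos table
lemma pvSim (cs : List (List Int)) :
    ∀ (fuel : Nat) (stack : List Int) (visited : PySem.Set Int)
      (pos : PySem.Dict Int Int) (k rev : Int),
    (∀ x, visited.contains x = (pos.get? x).isSome) →
    (∀ x i, pos.get? x = some i → i < k) →
    rev = pvCountB cs pos →
    pvLoopA (cs.foldl pvRowA PySem.Dict.empty) fuel stack visited rev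
      = pvCountB cs (pvLoopB (cs.foldl pvRowB PySem.Dict.empty) fuel stack pos k) := by
  intro fuel
  induction fuel with
  | zero => intro stack visited pos k rev hm hb hrev; simpa [pvLoopA, pvLoopB] using hrev
  | succ fuel ih =>
      intro stack visited pos k rev hm hb hrev
      rcases stack with _ | ⟨city, rest⟩
      · simpa [pvLoopA, pvLoopB] using hrev
      · simp only [pvLoopA, pvLoopB]
        rw [hm city]
        rcases hv : (pos.get? city) with _ | i
        · -- city unvisited: both visit it
          simp only [hv, Option.isSome_none, Bool.false_eq_true, if_false]
          rw [pvBuildA_getD, pvBuildB_getD, PySem.Dict.getD_empty, PySem.Dict.getD_empty,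
            List.nil_append, List.nil_append]
          have hm' : ∀ x, (visited.add city).contains x
              = ((pos.insert city k).get? x).isSome := by
            intro x
            rw [Bool.eq_iff_iff, PySem.Set.contains_iff, PySem.Set.mem_add]
            by_cases hx : x = city
            · subst hx; simp [PySem.Dict.get?_insert_self]
            · rw [PySem.Dict.get?_insert_of_ne _ _ hx]
              have := hm x
              rw [Bool.eq_iff_iff, PySem.Set.contains_iff] at this
              simp [hx, this]
          rw [pvScan_eq (visited.add city) (pos.insert city k) hm']
          apply ih
          · exact hm'
          · intro x i hx
            by_cases hxc : x = city
            · subst hxc; rw [PySem.Dict.get?_insert_self] at hx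
              cases hx; omega
            · rw [PySem.Dict.get?_insert_of_ne _ _ hxc] at hx
              have := hb x i hx; omega
          · have hrev' : rev = (cs.map (pvContrib pos)).sum := by
              rw [hrev, pvCountB_eq_sum]
            show rev + pvCnt (visited.add city).contains (pvAdjA cs city)
                = pvCountB cs (pos.insert city k)
            rw [pvCountB_eq_sum, pvCnt_congr _ _ hm', pvCnt_flatMap, hrev',
              ← PySem.List.sum_map_add_int]
            exact (congrArg List.sum (List.map_congr_left
              (fun r _ => pvContrib_insert pos k city hv hb r))).symm
        · -- already visited: both skip
          simp only [hv, Option.isSome_some, if_true]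
          exact ih rest visited pos k rev hm hb hrev

lemma pvContrib_empty (row : List Int) : pvContrib PySem.Dict.empty row = 0 := by
  rcases row with _ | ⟨a, _ | ⟨b, _ | _⟩⟩ <;> simp [pvContrib, PySem.Dict.get?_empty]

-- ===== VERDICT (by name: the statement is the Claim_ definition above) =====
theorem minReorder_approach4_iterative_dfs_spec : Claim_equal_minReorder_approach4_iterative_dfs := by
  intro n cs _ _
  unfold Spec_minReorder_approach4_iterative_dfs
  unfold minReorder_approach4_iterative_dfs minReorder_approach4_iterative_dfs_alt
  apply pvSim
  · intro x; rfl
  · intro x i hx; rw [PySem.Dict.get?_empty] at hx; cases hx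
  · rw [pvCountB_eq_sum,
      show cs.map (pvContrib PySem.Dict.empty) = cs.map (fun _ => (0 : Int)) from
        List.map_congr_left (fun r _ => pvContrib_empty r)]
    simp
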